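-- pv_equiv track=rewrite | github.com/IES-Rafael-Alberti/2324-u2-sentencias-repetitivas-naatii | src/trianguloNumero.py | crearFilas
-- ===== SOURCE A (Python) =====
-- def crearFilas(numero:int)->list:
--     """Escribir un programa que pida al usuario un número entero y muestre por pantalla un triángulo rectángulo como el de más abajo.
--
--     1
--     3 1
--     5 3 1
--     7 5 3 1
--     9 7 5 3 1
--
--     Args:
--         numero (int): El número con el cual se va a hacer el triángulo de números
--
--     Returns:
--         list: devolucion de una lista de listas con todas las iteraciones necesarias para luego imprimirlo por pantalla
--     """
--     filas = []
--     for i in range(1, numero + 1, 2):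
--         fila = []
--         for j in range(i, 0, -2):
--             fila.append(j)
--         filas.append(fila)
--     return filas
-- ===== SOURCE B (Python) =====
-- def crearFilas(numero: int) -> list:
--     """Build the triangle rows of descending odd numbers.
--
--     Each row is derived from the previous one by prepending the next odd
--     value, instead of rebuilding every row with a nested countdown loop.
--     """
--     filas = []
--     prev = []
--     for v in range(1, numero + 1, 2):
--         fila = [v] + prev
--         filas.append(fila)
--         prev = fila
--     return filas
-- ===== Notes on version B (the rewrite author's own statement) =====
-- stated objective: alternative
-- what changed: B removes A's inner countdown loop: each row is built by prepending the new leading odd value to the previous row kept in an accumulator.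
import Mathlib
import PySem

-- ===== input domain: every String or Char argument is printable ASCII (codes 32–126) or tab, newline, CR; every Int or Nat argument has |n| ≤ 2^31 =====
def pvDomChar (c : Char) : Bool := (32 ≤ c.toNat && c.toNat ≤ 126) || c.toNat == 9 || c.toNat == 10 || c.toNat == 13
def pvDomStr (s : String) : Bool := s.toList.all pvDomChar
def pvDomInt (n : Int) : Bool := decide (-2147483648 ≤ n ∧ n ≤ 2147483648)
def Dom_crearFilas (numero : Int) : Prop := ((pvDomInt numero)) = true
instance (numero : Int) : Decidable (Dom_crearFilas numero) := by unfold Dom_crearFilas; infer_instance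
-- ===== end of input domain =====

-- B builds each row by prepending the new leading odd value to the previous row (no inner loop).

-- ===== PORT A =====
def crearFilas (numero : Int) : List (List Int) :=
  (PySem.List.pyRange 1 (numero + 1) 2).foldl
    (fun filas i =>
      filas ++ [(PySem.List.pyRange i 0 (-2)).foldl (fun fila j => fila ++ [j]) []])
    []

-- ===== PORT B =====
def crearFilas_alt (numero : Int) : List (List Int) :=
  ((PySem.List.pyRange 1 (numero + 1) 2).foldl
    (fun (st : List (List Int) × List Int) v =>
      let fila := v :: st.2
      (st.1 ++ [fila], fila))
    ([], [])).1

-- ===== PRECONDITION & SPEC =====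
def Spec_crearFilas (numero : Int) (out : List (List Int)) : Prop := out = crearFilas_alt numero
instance (numero : Int) (out : List (List Int)) : Decidable (Spec_crearFilas numero out) := by unfold Spec_crearFilas; infer_instance

-- ===== CLAIM (what is proved, stated in full; the proofs are below) =====
def Claim_equal_crearFilas : Prop := ∀ (numero : Int), Dom_crearFilas numero → Spec_crearFilas numero (crearFilas numero)

-- ===== LEMMAS AND PROOFS =====

/-- A's inner countdown row, as a name for the proofs. -/
def pvRow (i : Int) : List Int := PySem.List.pyRange i 0 (-2)

theorem pv_foldl_app {α β : Type} (f : α → β) :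
    ∀ (xs : List α) (a : List β),
      xs.foldl (fun acc x => acc ++ [f x]) a = a ++ xs.map f := by
  intro xs
  induction xs with
  | nil => simp
  | cons x xs ih => intro a; simp [ih]

theorem pv_row_cons (i : Int) (h : 0 < i) : pvRow i = i :: pvRow (i - 2) := by
  by_cases h2 : (0:Int) < i - 2
  · unfold pvRow PySem.List.pyRange
    norm_num [h, h2]
    rw [if_pos (show 2 < i by omega)]
    rw [show ((i + 2 - 1)/2).toNat = ((i-1)/2).toNat + 1 by omega]
    rw [List.range_succ_eq_map, List.map_cons, List.map_map]
    congr 1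
    · norm_num
    · apply List.map_congr_left
      intro k _
      simp only [Function.comp_apply, Nat.succ_eq_add_one]
      push_cast
      ring
  · rcases show i = 1 ∨ i = 2 by omega with rfl | rfl <;> decide

theorem pv_bstate (cnt : Nat) :
    (((List.range cnt).map (fun k : Nat => (1 + 2 * k : Int))).foldl
      (fun (st : List (List Int) × List Int) v => (st.1 ++ [v :: st.2], v :: st.2))
      ([], []))
    = ((List.range cnt).map (fun k : Nat => pvRow (1 + 2 * k : Int)),
       pvRow (2 * (cnt : Int) - 1)) := by
  induction cnt with
  | zero => simp; decide
  | succ n ih =>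
      rw [List.range_succ, List.map_append, List.foldl_append, ih]
      simp only [List.map_cons, List.map_nil, List.foldl_cons, List.foldl_nil]
      have hr := pv_row_cons (1 + 2 * (n : Int)) (by positivity)
      rw [show (1 + 2 * (n:Int)) - 2 = 2 * (n:Int) - 1 by ring] at hr
      rw [List.map_append, List.map_cons, List.map_nil,
        show (2 * (((n+1:Nat)):Int) - 1) = 1 + 2 * (n:Int) by push_cast; ring, ← hr]

-- ===== VERDICT (by name: the statement is the Claim_ definition above) =====
theorem crearFilas_spec : Claim_equal_crearFilas := by
  intro numero _
  unfold Spec_crearFilas crearFilas crearFilas_alt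
  rw [PySem.List.pyRange_of_pos 1 (numero + 1) (by norm_num)]
  have hrow : ∀ i : Int,
      (PySem.List.pyRange i 0 (-2)).foldl (fun fila j => fila ++ [j]) [] = pvRow i := by
    intro i
    have := pv_foldl_app (id : Int → Int) (PySem.List.pyRange i 0 (-2)) []
    simpa [pvRow] using this
  generalize (if 1 < numero + 1 then ((numero + 1 - 1 + 2 - 1) / 2).toNat else 0) = cnt
  have hz : (fun (st : List (List Int) × List Int) (v : Int) =>
      let fila := v :: st.2
      (st.1 ++ [fila], fila))
    = (fun (st : List (List Int) × List Int) (v : Int) => (st.1 ++ [v :: st.2], v :: st.2)) := rfl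
  rw [hz, pv_bstate]
  simp only [hrow]
  rw [pv_foldl_app pvRow]
  simp [List.map_map, Function.comp]
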